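-- pv_equiv track=rewrite | github.com/Sam-Wu-dev/MultiMediaHomework | Inverse.py | gf_inverse
-- ===== SOURCE A (Python) =====
-- def gf_inverse(x):
--     """Compute multiplicative inverse in GF(2^8) using Extended Euclidean Algorithm."""
--     if x == 0:
--         return 0
--     u = x
--     v = 0x11b # Reduction polynomial x^8 + x^4 + x^3 + x + 1
--     g1 = 1
--     g2 = 0
--     while u != 1:
--         j = len(bin(u)) - len(bin(v))
--         if j < 0:
--             u, v = v, u
--             g1, g2 = g2, g1
--             j = -j
--         u = u ^ (v << j)
--         g1 = g1 ^ (g2 << j)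
--     return g1
-- ===== SOURCE B (Python) =====
-- def gf_mult(a, b):
--     """Carry-less multiplication in GF(2^8) modulo 0x11b."""
--     p = 0
--     for _ in range(8):
--         if b & 1:
--             p ^= a
--         b >>= 1
--         a <<= 1
--         if a & 0x100:
--             a ^= 0x11b
--     return p & 0xff
--
-- def gf_inverse(x):
--     """Inverse in GF(2^8) by Fermat: x^254 = x^2 * x^4 * ... * x^128."""
--     y = x
--     r = 1
--     for _ in range(7):
--         y = gf_mult(y, y)
--         r = gf_mult(r, y)
--     return r
-- ===== Notes on version B (the rewrite author's own statement) =====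
-- stated objective: simpler
-- what changed: Replaced the extended-Euclid gcd loop (bit-length comparisons, swaps, shifted XORs) by Fermat's little theorem: x^254 computed with a fixed seven-step square-and-multiply chain over a carry-less gf_mult reduced mod 0x11b.
-- outside the precondition, e.g. on gf_inverse(256): A returns 204, B returns 0; on gf_inverse(300): A returns 66, B returns 48
import Mathlib
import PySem

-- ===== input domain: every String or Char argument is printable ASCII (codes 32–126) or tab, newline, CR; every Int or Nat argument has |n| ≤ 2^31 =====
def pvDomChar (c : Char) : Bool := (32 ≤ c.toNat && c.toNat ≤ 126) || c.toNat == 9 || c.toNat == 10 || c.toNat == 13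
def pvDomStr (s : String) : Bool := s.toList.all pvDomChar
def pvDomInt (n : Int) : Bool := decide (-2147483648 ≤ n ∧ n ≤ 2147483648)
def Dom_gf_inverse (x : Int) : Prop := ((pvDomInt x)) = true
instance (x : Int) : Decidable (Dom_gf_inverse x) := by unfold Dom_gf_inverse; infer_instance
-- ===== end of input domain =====

-- B replaces the extended-Euclid gcd loop with Fermat's little theorem (x^254 by
-- square-and-multiply over a carry-less multiply mod 0x11b); objective: simpler.

-- ===== PORT A =====
-- len(bin(n)) for an int n: '0b'+digits (and a '-' sign for negatives); exact for every Int.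
def pyBinLen (n : Int) : Int :=
  if n < 0 then (PySem.Int.bitLength n : Int) + 3
  else if n = 0 then 3
  else (PySem.Int.bitLength n : Int) + 2

-- the 'while u != 1' loop; fuel only makes the recursion total (g1 returned on exhaustion,
-- never reached on Pre_): state (u, v, g1, g2) exactly as in A.
def gfLoop : Nat → Int → Int → Int → Int → Int
  | 0, _, _, g1, _ => g1
  | fuel + 1, u, v, g1, g2 =>
    if u ≠ 1 then
      let j := pyBinLen u - pyBinLen v
      let (u, v, g1, g2, j) := if j < 0 then (v, u, g2, g1, -j) else (u, v, g1, g2, j)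
      -- v << j with j ≥ 0 is v * 2^j
      gfLoop fuel (PySem.Int.bxor u (v * 2 ^ j.toNat)) v
        (PySem.Int.bxor g1 (g2 * 2 ^ j.toNat)) g2
    else g1

def gf_inverse (x : Int) : Int :=
  if x = 0 then 0 else gfLoop 1000 x 0x11b 1 0

-- ===== PORT B =====
def gfMult (a b : Int) : Int :=
  let s := (List.range 8).foldl (fun (s : Int × Int × Int) _ =>
    let p := s.1; let a := s.2.1; let b := s.2.2
    let p := if PySem.Int.band b 1 ≠ 0 then PySem.Int.bxor p a else p
    let b := PySem.Int.floordiv b 2        -- b >>= 1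
    let a := a * 2                         -- a <<= 1
    let a := if PySem.Int.band a 0x100 ≠ 0 then PySem.Int.bxor a 0x11b else a
    (p, a, b)) (0, a, b)
  PySem.Int.band s.1 0xff

def gf_inverse_alt (x : Int) : Int :=
  let s := (List.range 7).foldl (fun (s : Int × Int) _ =>
    let y := gfMult s.1 s.1
    (y, gfMult s.2 y)) (x, 1)
  s.2

-- ===== PRECONDITION & SPEC =====
-- Pre_ restricts to the intended domain of GF(2^8) elements 0..255: outside it A either
-- diverges (negative x, carry-less multiples of 0x11b) or returns the inverse of the
-- carry-less residue of x — an artefact of the unreduced Euclid loop (see claim cites).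
def Pre_gf_inverse (x : Int) : Prop := 0 ≤ x ∧ x < 256
instance (x : Int) : Decidable (Pre_gf_inverse x) := by unfold Pre_gf_inverse; infer_instance
def pvWitness_gf_inverse : Int := (3)

def Spec_gf_inverse (x : Int) (out : Int) : Prop := out = gf_inverse_alt x
instance (x : Int) (out : Int) : Decidable (Spec_gf_inverse x out) := by unfold Spec_gf_inverse; infer_instance

-- ===== CLAIM (what is proved, stated in full; the proofs are below) =====
def Claim_equal_gf_inverse : Prop := ∀ (x : Int), Dom_gf_inverse x → Pre_gf_inverse x → Spec_gf_inverse x (gf_inverse x)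

-- ===== LEMMAS AND PROOFS =====
set_option maxRecDepth 100000 in
set_option maxHeartbeats 1000000 in
theorem gf_inverse_eq_of_lt (n : Nat) (h : n < 256) :
    gf_inverse (n : Int) = gf_inverse_alt (n : Int) := by
  revert h; revert n; decide

-- ===== VERDICT (by name: the statement is the Claim_ definition above) =====
theorem gf_inverse_spec : Claim_equal_gf_inverse := by
  intro x _ hpre
  unfold Pre_gf_inverse at hpre
  have hx : x = ((x.toNat : Nat) : Int) := by omega
  have hlt : x.toNat < 256 := by omega
  unfold Spec_gf_inverse
  rw [hx]
  exact gf_inverse_eq_of_lt x.toNat hlt
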